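-- pv_equiv track=rewrite | github.com/lkesteloot/boggle | utils.py | make_next_word
-- ===== SOURCE A (Python) =====
-- def make_next_word(word):
--     """Returns next_word such that "word < longer_word < next_word" if and only if
--     word is a prefix of longer_word.
--
--     For example, "a" returns "b", "hello" returns "hellp", "pooz" returns "pop",
--     and "z" returns "{"."""
--
--     if not word:
--         return "{"
--
--     prefix = word[:-1]
--     last_ch = word[-1]
--     if last_ch == "z":
--         return make_next_word(prefix)
--     else:
--         return prefix + chr(ord(last_ch) + 1)
-- ===== SOURCE B (Python) =====
-- def make_next_word(word):
--     stripped = word.rstrip('z')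
--     if not stripped:
--         return "{"
--     return stripped[:-1] + chr(ord(stripped[-1]) + 1)
-- ===== Notes on version B (the rewrite author's own statement) =====
-- stated objective: simpler
-- what changed: Replaces the tail recursion that peels trailing 'z' characters one call at a time with a single rstrip of the 'z' tail followed by incrementing the last remaining character.
import Mathlib
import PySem

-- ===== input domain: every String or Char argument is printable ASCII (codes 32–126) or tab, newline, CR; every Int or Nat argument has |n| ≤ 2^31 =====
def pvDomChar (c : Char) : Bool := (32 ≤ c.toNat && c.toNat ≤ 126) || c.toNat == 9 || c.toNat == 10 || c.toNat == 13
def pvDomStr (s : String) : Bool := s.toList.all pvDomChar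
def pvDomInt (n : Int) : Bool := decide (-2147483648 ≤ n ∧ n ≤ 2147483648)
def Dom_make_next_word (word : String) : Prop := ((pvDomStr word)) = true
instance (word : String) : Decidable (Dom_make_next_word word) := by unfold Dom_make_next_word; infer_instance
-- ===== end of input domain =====

-- B replaces A's tail recursion over trailing 'z' characters by a single strip of the
-- 'z' tail followed by incrementing the last remaining character (objective: simpler).

-- ===== PORT A =====
-- A recurses on word[:-1] while the last character is 'z'.  We transcribe this as a
-- structural recursion over the REVERSED character list: the head of the reversed list
-- is word[-1], the tail (reversed back) is word[:-1].
def mkNextRev : List Char → List Char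
  | [] => ['{']                                   -- `if not word: return "{"`
  | c :: rest =>
      if c = 'z' then mkNextRev rest              -- `return make_next_word(prefix)`
      else rest.reverse ++ [Char.ofNat (c.toNat + 1)]   -- `prefix + chr(ord(last_ch)+1)`

def make_next_word (word : String) : String :=
  String.mk (mkNextRev word.toList.reverse)

-- ===== PORT B =====
-- `word.rstrip('z')` = drop the 'z' prefix of the reversed list; then either "{" or
-- `stripped[:-1] + chr(ord(stripped[-1]) + 1)`.
def make_next_word_alt (word : String) : String :=
  match word.toList.reverse.dropWhile (fun c => c = 'z') with
  | [] => "{"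
  | c :: rest => String.mk (rest.reverse ++ [Char.ofNat (c.toNat + 1)])

-- ===== PRECONDITION & SPEC =====
def Spec_make_next_word (word : String) (out : String) : Prop := out = make_next_word_alt word
instance (word : String) (out : String) : Decidable (Spec_make_next_word word out) := by unfold Spec_make_next_word; infer_instance

-- ===== CLAIM (what is proved, stated in full; the proofs are below) =====
def Claim_equal_make_next_word : Prop := ∀ (word : String), Dom_make_next_word word → Spec_make_next_word word (make_next_word word)

-- ===== LEMMAS AND PROOFS =====
theorem mkNextRev_eq_dropWhile (r : List Char) :
    mkNextRev r = (match r.dropWhile (fun c => c = 'z') with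
      | [] => ['{']
      | c :: rest => rest.reverse ++ [Char.ofNat (c.toNat + 1)]) := by
  induction r with
  | nil => rfl
  | cons c rest ih =>
      by_cases h : c = 'z' <;> simp [mkNextRev, List.dropWhile, h, ih]

-- ===== VERDICT (by name: the statement is the Claim_ definition above) =====
theorem make_next_word_spec : Claim_equal_make_next_word := by
  intro word _
  unfold Spec_make_next_word make_next_word make_next_word_alt
  rw [mkNextRev_eq_dropWhile]
  cases h : word.toList.reverse.dropWhile (fun c => c = 'z') <;> rfl
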